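-- pv_equiv track=rewrite | github.com/ThePro8601/Simplify360_Tasks | friendship_query_problem.py | find_connection_degree
-- ===== SOURCE A (Python) =====
-- import collections
--
-- friendships = {
--     "alice": ["bob", "charlie"],
--     "bob": ["alice", "janice"],
--     "charlie": ["alice"],
--     "janice": ["bob"]
-- }
--
-- def find_friends(name):
--     name = name.lower()
--     return friendships.get(name, [])
--
-- def find_connection_degree(name1, name2):
--     name1, name2 = name1.lower(), name2.lower()
--     if name1 not in friendships or name2 not in friendships:
--         return -1
--     if name1 == name2:
--         return 0
--
--     visited = set()
--     queue = collections.deque([(name1, 0)])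
--
--     while queue:
--         current, degree = queue.popleft()
--
--         if current in visited:
--             continue
--         visited.add(current)
--
--         for friend in find_friends(current):
--             if friend == name2:
--                 return degree + 1
--             if friend not in visited:
--                 queue.append((friend, degree + 1))
--
--     return -1
-- ===== SOURCE B (Python) =====
-- friendships = {
--     "alice": ["bob", "charlie"],
--     "bob": ["alice", "janice"],
--     "charlie": ["alice"],
--     "janice": ["bob"]
-- }
--
-- def find_friends(name):
--     name = name.lower()
--     return friendships.get(name, [])
--
-- def find_connection_degree(name1, name2):
--     name1, name2 = name1.lower(), name2.lower()
--     if name1 not in friendships or name2 not in friendships: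
--         return -1
--     if name1 == name2:
--         return 0
--
--     visited = set()
--     frontier = {name1}
--     degree = 0
--     while frontier:
--         if name2 in frontier:
--             return degree
--         visited |= frontier
--         next_frontier = set()
--         for person in frontier:
--             for friend in find_friends(person):
--                 if friend not in visited:
--                     next_frontier.add(friend)
--         frontier = next_frontier
--         degree += 1
--     return -1
-- ===== Notes on version B (the rewrite author's own statement) =====
-- stated objective: alternative
-- what changed: Queue-of-(node,degree)-pairs BFS with per-pop visited check and early return inside the neighbor loop is replaced by level-synchronous BFS: a frontier set per degree level, checked wholesale for the target before expanding, with no per-node degree bookkeeping.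
import Mathlib
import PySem

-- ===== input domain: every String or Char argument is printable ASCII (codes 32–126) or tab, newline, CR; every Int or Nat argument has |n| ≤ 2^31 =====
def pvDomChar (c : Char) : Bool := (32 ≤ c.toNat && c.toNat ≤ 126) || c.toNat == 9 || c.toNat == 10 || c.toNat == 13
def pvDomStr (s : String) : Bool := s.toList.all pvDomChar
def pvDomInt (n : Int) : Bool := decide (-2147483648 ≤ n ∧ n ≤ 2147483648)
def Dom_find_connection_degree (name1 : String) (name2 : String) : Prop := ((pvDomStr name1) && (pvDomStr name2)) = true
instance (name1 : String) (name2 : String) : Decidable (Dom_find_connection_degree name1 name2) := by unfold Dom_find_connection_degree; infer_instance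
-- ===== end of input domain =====

-- B replaces A's queue-of-(node,degree) BFS by level-synchronous frontier BFS (alternative decomposition; same guards, same results).

-- ===== PORT A =====
def friendships : PySem.Dict String (List String) :=
  PySem.Dict.ofList [("alice", ["bob", "charlie"]), ("bob", ["alice", "janice"]),
                     ("charlie", ["alice"]), ("janice", ["bob"])]

def find_friends (name : String) : List String :=
  let name := PySem.Str.lower name
  friendships.getD name []

-- the inner 'for friend in find_friends(current)' loop: early return = some, else the extended queue
def pyInnerA : List String → String → PySem.Set String → Int → List (String × Int) → Option Int × List (String × Int)
  | [], _, _, _, queue => (none, queue)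
  | f :: fs, name2, visited, degree, queue =>
    if f == name2 then (some (degree + 1), queue)
    else if !(PySem.Set.contains visited f) then pyInnerA fs name2 visited degree (queue ++ [(f, degree + 1)])
    else pyInnerA fs name2 visited degree queue

-- the 'while queue' loop; fuel only makes the recursion total, -1 on exhaustion matches loop exit
def pyLoopA : Nat → PySem.Set String → List (String × Int) → String → Int
  | 0, _, _, _ => -1
  | _ + 1, _, [], _ => -1
  | fuel + 1, visited, (current, degree) :: rest, name2 =>
    if PySem.Set.contains visited current then pyLoopA fuel visited rest name2
    else
      let visited := PySem.Set.add visited current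
      match pyInnerA (find_friends current) name2 visited degree rest with
      | (some r, _) => r
      | (none, queue) => pyLoopA fuel visited queue name2

def find_connection_degree (name1 : String) (name2 : String) : Int :=
  let name1 := PySem.Str.lower name1
  let name2 := PySem.Str.lower name2
  if !(friendships.contains name1) || !(friendships.contains name2) then -1
  else if name1 == name2 then 0
  else pyLoopA 100 PySem.Set.empty [(name1, 0)] name2

-- ===== PORT B =====
-- the 'while frontier' loop of Source B; fuel only makes the recursion total, -1 on exhaustion matches loop exit
def pyLoopB : Nat → PySem.Set String → PySem.Set String → String → Int → Int
  | 0, _, _, _, _ => -1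
  | fuel + 1, visited, frontier, name2, degree =>
    match frontier with
    | [] => -1
    | _ :: _ =>
      if PySem.Set.contains frontier name2 then degree
      else
        let visited := PySem.Set.update visited frontier
        let next := frontier.foldl (fun nf person =>
            (find_friends person).foldl (fun nf friend =>
              if !(PySem.Set.contains visited friend) then PySem.Set.add nf friend else nf) nf)
          PySem.Set.empty
        pyLoopB fuel visited next name2 (degree + 1)

def find_connection_degree_alt (name1 : String) (name2 : String) : Int :=
  let name1 := PySem.Str.lower name1
  let name2 := PySem.Str.lower name2
  if !(friendships.contains name1) || !(friendships.contains name2) then -1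
  else if name1 == name2 then 0
  else pyLoopB 100 PySem.Set.empty (PySem.Set.ofList [name1]) name2 0

-- ===== PRECONDITION & SPEC =====
def Spec_find_connection_degree (name1 : String) (name2 : String) (out : Int) : Prop := out = find_connection_degree_alt name1 name2
instance (name1 : String) (name2 : String) (out : Int) : Decidable (Spec_find_connection_degree name1 name2 out) := by unfold Spec_find_connection_degree; infer_instance

-- ===== CLAIM (what is proved, stated in full; the proofs are below) =====
def Claim_equal_find_connection_degree : Prop := ∀ (name1 : String) (name2 : String), Dom_find_connection_degree name1 name2 → Spec_find_connection_degree name1 name2 (find_connection_degree name1 name2)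

-- ===== LEMMAS AND PROOFS =====

-- the common body of both ports after the lowering step, per port
def coreA (l1 l2 : String) : Int :=
  if !(friendships.contains l1) || !(friendships.contains l2) then -1
  else if l1 == l2 then 0
  else pyLoopA 100 PySem.Set.empty [(l1, 0)] l2

def coreB (l1 l2 : String) : Int :=
  if !(friendships.contains l1) || !(friendships.contains l2) then -1
  else if l1 == l2 then 0
  else pyLoopB 100 PySem.Set.empty (PySem.Set.ofList [l1]) l2 0

theorem members_of_contains (s : String) (h : friendships.contains s = true) :
    s = "alice" ∨ s = "bob" ∨ s = "charlie" ∨ s = "janice" := by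
  rw [PySem.Dict.contains_eq_decide_mem_keys] at h
  have hk : friendships.keys = ["alice", "bob", "charlie", "janice"] := by decide
  rw [hk] at h
  simpa using h

theorem core_eq (l1 l2 : String) : coreA l1 l2 = coreB l1 l2 := by
  unfold coreA coreB
  by_cases h1 : friendships.contains l1 = true
  · by_cases h2 : friendships.contains l2 = true
    · rcases members_of_contains l1 h1 with rfl | rfl | rfl | rfl <;>
        rcases members_of_contains l2 h2 with rfl | rfl | rfl | rfl <;> decide
    · simp [Bool.not_eq_true] at h2
      simp [h2]
  · simp [Bool.not_eq_true] at h1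
    simp [h1]

-- ===== VERDICT (by name: the statement is the Claim_ definition above) =====
theorem find_connection_degree_spec : Claim_equal_find_connection_degree := by
  intro name1 name2 _
  exact core_eq (PySem.Str.lower name1) (PySem.Str.lower name2)
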